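-- pv_equiv track=rewrite | github.com/here-news/service_farm | backend/workers/entity_merge_worker.py | _pick_canonical
-- ===== SOURCE A (Python) =====
-- from typing import List, Dict, Tuple
--
-- def _pick_canonical(names: List[str], mention_counts: List[int]) -> int:
--     """
--     Pick the best canonical entity from duplicates
--
--     Priority:
--     1. Most mentions
--     2. Longest name (usually more specific)
--     3. First alphabetically
--     """
--     # Find max mentions
--     max_mentions = max(mention_counts)
--
--     # Filter to entities with max mentions
--     candidates = [
--         (i, name, count)
--         for i, (name, count) in enumerate(zip(names, mention_counts))
--         if count == max_mentions
--     ]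
--
--     # If tie, pick longest name
--     if len(candidates) > 1:
--         candidates.sort(key=lambda x: (len(x[1]), x[1]), reverse=True)
--
--     return candidates[0][0]
-- ===== SOURCE B (Python) =====
-- from typing import List
--
-- def _pick_canonical(names: List[str], mention_counts: List[int]) -> int:
--     # Single linear scan: among entries with the maximal count, keep the first
--     # index whose (len(name), name) key is strictly greatest (first wins ties,
--     # matching A's stable reverse sort).
--     max_mentions = max(mention_counts)
--     best = None
--     for i, (name, count) in enumerate(zip(names, mention_counts)):
--         if count == max_mentions:
--             if best is None or (len(best[1]), best[1]) < (len(name), name):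
--                 best = (i, name)
--     return best[0]
-- ===== Notes on version B (the rewrite author's own statement) =====
-- stated objective: simpler
-- what changed: Replaces building a candidate list and stably reverse-sorting it by (len(name), name) with a single linear scan that tracks the first argmax entry, updating only on a strictly greater key.
import Mathlib
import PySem

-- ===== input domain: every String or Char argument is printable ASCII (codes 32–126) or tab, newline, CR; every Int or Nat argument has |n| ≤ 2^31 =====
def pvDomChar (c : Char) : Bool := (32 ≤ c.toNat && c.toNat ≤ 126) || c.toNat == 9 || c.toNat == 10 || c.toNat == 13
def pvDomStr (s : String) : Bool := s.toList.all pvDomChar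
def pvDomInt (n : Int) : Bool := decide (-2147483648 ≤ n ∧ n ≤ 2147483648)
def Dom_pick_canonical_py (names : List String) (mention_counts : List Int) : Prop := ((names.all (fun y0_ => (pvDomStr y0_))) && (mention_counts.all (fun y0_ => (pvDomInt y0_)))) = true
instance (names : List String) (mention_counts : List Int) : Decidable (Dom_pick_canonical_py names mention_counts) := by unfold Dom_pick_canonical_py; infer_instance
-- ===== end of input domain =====

-- B replaces A's filter + stable reverse sort by a single linear scan tracking the
-- first argmax entry by the key (len(name), name) — a simpler one-pass algorithm.

-- ===== PORT A =====
def pick_canonical_py (names : List String) (mention_counts : List Int) : Int :=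
  match PySem.List.max? mention_counts (fun x => x) with
  | none => 0        -- max([]) raises ValueError; excluded by Pre_
  | some max_mentions =>
    let candidates : List (Int × String × Int) :=
      ((PySem.List.enumerate (names.zip mention_counts)).filter
        (fun p => p.2.2 == max_mentions)).map (fun p => (p.1, p.2.1, p.2.2))
    let candidates :=
      if 1 < candidates.length then
        PySem.List.sorted2 candidates (fun t => PySem.Str.len t.2.1) (fun t => t.2.1.toList) true
      else candidates
    match candidates.head? with
    | none => 0      -- candidates[0] raises IndexError; excluded by Pre_
    | some t => t.1

-- ===== PORT B =====
def pick_canonical_py_alt (names : List String) (mention_counts : List Int) : Int :=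
  match PySem.List.max? mention_counts (fun x => x) with
  | none => 0        -- max([]) raises ValueError; excluded by Pre_
  | some max_mentions =>
    let best : Option (Int × String) :=
      (PySem.List.enumerate (names.zip mention_counts)).foldl
        (fun best p =>
          if p.2.2 == max_mentions then
            match best with
            | none => some (p.1, p.2.1)
            | some b =>
              if PySem.Str.len b.2 < PySem.Str.len p.2.1
                 || (PySem.Str.len b.2 == PySem.Str.len p.2.1 && decide (b.2.toList < p.2.1.toList))
              then some (p.1, p.2.1) else best
          else best) none
    match best with
    | none => 0      -- best[0] with best None raises; excluded by Pre_
    | some b => b.1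

-- ===== PRECONDITION & SPEC =====
-- Pre_ excludes exactly the inputs where Python A raises: max([]) (ValueError) and an
-- empty candidate list, i.e. no zip entry attaining the maximum count (IndexError).
def Pre_pick_canonical_py (names : List String) (mention_counts : List Int) : Prop :=
  ∃ p ∈ names.zip mention_counts, ∀ c ∈ mention_counts, c ≤ p.2
instance (names : List String) (mention_counts : List Int) : Decidable (Pre_pick_canonical_py names mention_counts) := by unfold Pre_pick_canonical_py; infer_instance

def pvWitness_pick_canonical_py : List String × List Int := (["a", "bb"], [2, 2])

def Spec_pick_canonical_py (names : List String) (mention_counts : List Int) (out : Int) : Prop := out = pick_canonical_py_alt names mention_counts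
instance (names : List String) (mention_counts : List Int) (out : Int) : Decidable (Spec_pick_canonical_py names mention_counts out) := by unfold Spec_pick_canonical_py; infer_instance

-- ===== CLAIM (what is proved, stated in full; the proofs are below) =====
def Claim_equal_pick_canonical_py : Prop := ∀ (names : List String) (mention_counts : List Int), Dom_pick_canonical_py names mention_counts → Pre_pick_canonical_py names mention_counts → Spec_pick_canonical_py names mention_counts (pick_canonical_py names mention_counts)

-- ===== LEMMAS AND PROOFS =====

-- proof-only helpers: B's accumulator step, max2?'s step, and the (index, name) projection
def pvStep2 (best : Option (Int × String)) (p : Int × String × Int) : Option (Int × String) :=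
  match best with
  | none => some (p.1, p.2.1)
  | some b =>
    if PySem.Str.len b.2 < PySem.Str.len p.2.1
       || (PySem.Str.len b.2 == PySem.Str.len p.2.1 && decide (b.2.toList < p.2.1.toList))
    then some (p.1, p.2.1) else best

def pvStepG (acc : Option (Int × String × Int)) (x : Int × String × Int) : Option (Int × String × Int) :=
  match acc with
  | none => some x
  | some m =>
    if (decide (PySem.Str.len m.2.1 < PySem.Str.len x.2.1)
        || (!decide (PySem.Str.len x.2.1 < PySem.Str.len m.2.1) && decide (m.2.1.toList < x.2.1.toList))) = true
    then some x else some m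

-- head of insertBy
theorem head?_insertBy {α : Type} (before : α → α → Bool) (x : α) (ys : List α) :
    (PySem.List.insertBy before x ys).head? =
      some (match ys with | [] => x | y :: _ => if before x y then x else y) := by
  cases ys with
  | nil => simp [PySem.List.insertBy]
  | cons y t => by_cases h : before x y = true <;> simp [PySem.List.insertBy, h]

-- head of an insertion-sort fold (reversed comparison) is the running first-argmax
theorem head?_foldl_insertBy {α : Type} (lt : α → α → Bool) :
    ∀ (xs : List α) (acc : List α),
      (xs.foldl (fun a x => PySem.List.insertBy (fun a b => lt b a) x a) acc).head? =
        xs.foldl (fun (o : Option α) x =>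
          match o with
          | none => some x
          | some m => if lt m x then some x else some m) acc.head? := by
  intro xs
  induction xs with
  | nil => intro acc; rfl
  | cons x t ih =>
    intro acc
    rw [List.foldl_cons, List.foldl_cons, ih]
    congr 1
    cases acc with
    | nil => simp [head?_insertBy]
    | cons y ys => by_cases h : lt y x = true <;> simp [head?_insertBy, h]

-- head of Python's stable reverse sort by a tuple key is the first max by that key
theorem head?_sorted2_rev {α κ₁ κ₂ : Type} [LT κ₁] [DecidableLT κ₁] [LT κ₂] [DecidableLT κ₂]
    (xs : List α) (k1 : α → κ₁) (k2 : α → κ₂) :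
    (PySem.List.sorted2 xs k1 k2 true).head? = PySem.List.max2? xs k1 k2 :=
  head?_foldl_insertBy
    (fun a b => decide (k1 a < k1 b) || (!decide (k1 b < k1 a) && decide (k2 a < k2 b))) xs []

-- Python's tuple '<' written with '==' agrees with the '!<' form on Int first components
theorem int_lex_eq (a b : Int) (s : Bool) :
    (decide (a < b) || ((a == b) && s)) = (decide (a < b) || (!decide (b < a) && s)) := by
  by_cases h1 : a < b
  · simp [h1]
  · by_cases h2 : a = b
    · subst h2
      simp
    · have h3 : b < a := by omega
      simp [h1, h2, h3]

-- one step of B's scan is one step of max2?, projected to (index, name)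
theorem pvStep2_map (o : Option (Int × String × Int)) (t : Int × String × Int) :
    pvStep2 (o.map (fun t => (t.1, t.2.1))) t
      = (pvStepG o t).map (fun t => (t.1, t.2.1)) := by
  cases o with
  | none => rfl
  | some m =>
    have h := int_lex_eq (PySem.Str.len m.2.1) (PySem.Str.len t.2.1) (decide (m.2.1.toList < t.2.1.toList))
    simp only [Option.map_some, pvStep2, pvStepG]
    rw [h]
    by_cases hc : (decide (PySem.Str.len m.2.1 < PySem.Str.len t.2.1)
        || (!decide (PySem.Str.len t.2.1 < PySem.Str.len m.2.1) && decide (m.2.1.toList < t.2.1.toList))) = true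
    · rw [if_pos hc, if_pos hc]; rfl
    · rw [if_neg hc, if_neg hc]; rfl

-- B's scan over the candidate list is max2? projected to (index, name)
theorem foldl_step2_eq (F : List (Int × String × Int)) :
    ∀ (o : Option (Int × String × Int)),
      F.foldl pvStep2 (o.map (fun t => (t.1, t.2.1)))
        = (F.foldl pvStepG o).map (fun t => (t.1, t.2.1)) := by
  induction F with
  | nil => intro o; rfl
  | cons t F ih =>
    intro o
    rw [List.foldl_cons, List.foldl_cons, pvStep2_map]
    exact ih (pvStepG o t)

-- head of A's conditionally sorted candidate list is the first max
theorem head?_cond_sorted (F : List (Int × String × Int)) :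
    (if 1 < F.length then
        PySem.List.sorted2 F (fun t => PySem.Str.len t.2.1) (fun t => t.2.1.toList) true
      else F).head? = PySem.List.max2? F (fun t => PySem.Str.len t.2.1) (fun t => t.2.1.toList) := by
  by_cases h : 1 < F.length
  · rw [if_pos h]; exact head?_sorted2_rev F _ _
  · rw [if_neg h]
    match F with
    | [] => rfl
    | [a] => rfl
    | a :: b :: t => simp at h

-- ===== VERDICT (by name: the statement is the Claim_ definition above) =====
theorem pick_canonical_py_spec : Claim_equal_pick_canonical_py := by
  intro names mention_counts _ _
  unfold Spec_pick_canonical_py pick_canonical_py pick_canonical_py_alt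
  cases hmx : PySem.List.max? mention_counts (fun x => x) with
  | none => rfl
  | some mx =>
    simp only []
    have hcand : ((PySem.List.enumerate (names.zip mention_counts)).filter
        (fun p => p.2.2 == mx)).map (fun p => (p.1, p.2.1, p.2.2))
        = (PySem.List.enumerate (names.zip mention_counts)).filter (fun p => p.2.2 == mx) := by
      simp
    rw [hcand, head?_cond_sorted]
    have hBfold :
        List.foldl (fun best p =>
            if p.2.2 == mx then
              match best with
              | none => some (p.1, p.2.1)
              | some b =>
                if PySem.Str.len b.2 < PySem.Str.len p.2.1
                   || (PySem.Str.len b.2 == PySem.Str.len p.2.1 && decide (b.2.toList < p.2.1.toList))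
                then some (p.1, p.2.1) else best
            else best) none (PySem.List.enumerate (names.zip mention_counts))
          = Option.map (fun t => (t.1, t.2.1))
              (List.foldl pvStepG none
                ((PySem.List.enumerate (names.zip mention_counts)).filter
                  (fun p => p.2.2 == mx))) := by
      rw [← foldl_step2_eq _ none]
      rw [List.foldl_filter]
      rfl
    rw [hBfold]
    have hmax2 : PySem.List.max2?
        ((PySem.List.enumerate (names.zip mention_counts)).filter (fun p => p.2.2 == mx))
        (fun t => PySem.Str.len t.2.1) (fun t => t.2.1.toList)
      = List.foldl pvStepG none
          ((PySem.List.enumerate (names.zip mention_counts)).filter (fun p => p.2.2 == mx)) := by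
      unfold PySem.List.max2?
      congr 1
      funext acc x
      cases acc <;> rfl
    rw [hmax2]
    cases List.foldl pvStepG none
        ((PySem.List.enumerate (names.zip mention_counts)).filter (fun p => p.2.2 == mx)) with
    | none => rfl
    | some t => rfl
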